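-- pv_equiv track=rewrite | github.com/yunusdemirci/DefectiveRamsey | gengraph.py | has_set_size_k
-- ===== SOURCE A (Python) =====
-- import itertools  # for combinations, count
--
-- def is_k_sparse(g, s, k):
--     for v in s:
--         d = 0
--         for x in g[v]:
--             if x in s:
--                 d += 1
--                 if d > k:
--                     return False
--     return True
--
-- def is_k_dense(g, s, k):
--     for v in s:
--         d = 0
--         for x in s:
--             if x != v and x not in g[v]:
--                 d += 1
--                 if d > k:
--                     return False
--     return True
--
-- def has_set_size_k(g, a, k, sparse_or_dense):
--     """Return True if g contains k sparse or dense set (depend on sparse_or_dense)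
--     of order a.
--
--     Arguments:
--     k -- nonnegative int
--     a -- nonnegative int
--     g -- graph
--     sparse_or_dense -- boolean
--       We search for an order-b k dense or sparse-set. If sparse_or_dense is True we
--     looking for dense set, otherwise sparse set.
--
--     See isograph.py for our graph representation.
--
--     >>> g = [ [3], [3], [3], [0,1,2] ]
--     >>> has_fset_with_last(0, 2, g, True)
--     True
--     >>> has_fset_with_last(0, 2, g, False)
--     True
--     """
--     if a < 0:
--         return False
--
--     n = len(g)
--     if a > n:
--         return False
--
--     for s in itertools.combinations(range(n), a):
--         if sparse_or_dense and is_k_sparse(g, s, k):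
--             return True
--         elif not(sparse_or_dense) and is_k_dense(g, s, k):
--             return True
--     return False
-- ===== SOURCE B (Python) =====
-- def has_set_size_k(g, a, k, sparse_or_dense):
--     if a < 0 or a > len(g):
--         return False
--     n = len(g)
--
--     if sparse_or_dense:
--         def gain(v, u):
--             return g[v].count(u)
--     else:
--         def gain(v, u):
--             return 1 if (u != v and u not in g[v]) else 0
--
--     # Backtracking: build the set one vertex at a time (in increasing order),
--     # maintaining each member's count incrementally; counts only grow when
--     # vertices are added, so a branch whose partial counts exceed k is pruned.
--     def search(need, start, chosen, cnt):
--         if need == 0: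
--             return True
--         for u in range(start, n):
--             new_cnt = [c + gain(v, u) for v, c in zip(chosen, cnt)]
--             cu = sum(gain(u, w) for w in chosen + [u])
--             if all(c <= k for c in new_cnt) and cu <= k:
--                 if search(need - 1, u + 1, chosen + [u], new_cnt + [cu]):
--                     return True
--         return False
--
--     return search(a, 0, [], [])
-- ===== Notes on version B (the rewrite author's own statement) =====
-- stated objective: alternative
-- what changed: B replaces exhaustive enumeration of all size-a combinations followed by a fresh predicate test per subset with recursive backtracking that builds the set one vertex at a time, maintaining every member's count incrementally and pruning any branch whose partial counts already exceed k (counts are monotone under adding vertices, so pruning is sound).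
-- outside the precondition, e.g. on has_set_size_k([[]], 1, -1, True): A returns True, B returns False
import Mathlib
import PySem

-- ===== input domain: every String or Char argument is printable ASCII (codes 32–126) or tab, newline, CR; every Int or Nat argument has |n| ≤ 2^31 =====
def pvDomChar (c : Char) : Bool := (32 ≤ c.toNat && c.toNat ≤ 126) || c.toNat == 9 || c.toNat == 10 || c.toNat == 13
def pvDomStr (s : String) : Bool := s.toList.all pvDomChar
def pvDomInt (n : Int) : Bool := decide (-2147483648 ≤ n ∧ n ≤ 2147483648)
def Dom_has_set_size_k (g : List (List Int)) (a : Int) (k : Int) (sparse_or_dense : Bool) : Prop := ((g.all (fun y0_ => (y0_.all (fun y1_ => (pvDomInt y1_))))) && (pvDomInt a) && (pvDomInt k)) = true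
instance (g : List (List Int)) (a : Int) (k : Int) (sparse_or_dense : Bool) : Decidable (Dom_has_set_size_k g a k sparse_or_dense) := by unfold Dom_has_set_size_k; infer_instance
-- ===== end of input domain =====

-- B replaces A's enumerate-every-combination-then-test scheme by recursive
-- backtracking that grows the set one vertex at a time with incrementally
-- maintained counts and prunes branches whose partial counts exceed k:
-- objective 'alternative' (same worst case, pruning helps in practice).

-- range(n) as a list of Ints (model of Python's range(n)); used by both ports.
def pvRange (n : Nat) : List Int := (List.range n).map Int.ofNat

-- ===== PORT A =====
-- itertools.combinations(range(n), a) in lexicographic order.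
def pvCombos (l : List Int) (a : Nat) : List (List Int) :=
  match a, l with
  | 0, _ => [[]]
  | _ + 1, [] => []
  | a + 1, x :: xs => ((pvCombos xs a).map (fun t => x :: t)) ++ pvCombos xs (a + 1)

-- inner loop of is_k_sparse: d counts elements of g[v] that are in s, early exit when d > k
def pvAInnerSparse (row s : List Int) (k d : Int) : Bool :=
  match row with
  | [] => true
  | x :: rest =>
    if x ∈ s then
      (if d + 1 > k then false else pvAInnerSparse rest s k (d + 1))
    else pvAInnerSparse rest s k d

-- is_k_sparse(g, s, k): loop over v in s (rem is the not-yet-processed suffix)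
def pvASparse (g : List (List Int)) (rem s : List Int) (k : Int) : Bool :=
  match rem with
  | [] => true
  | v :: rest =>
    if pvAInnerSparse ((PySem.List.pyGet? g v).getD []) s k 0 then pvASparse g rest s k
    else false

-- inner loop of is_k_dense: d counts x in s with x != v and x not in g[v], early exit
def pvAInnerDense (xs row : List Int) (v k d : Int) : Bool :=
  match xs with
  | [] => true
  | x :: rest =>
    if x ≠ v ∧ x ∉ row then
      (if d + 1 > k then false else pvAInnerDense rest row v k (d + 1))
    else pvAInnerDense rest row v k d

-- is_k_dense(g, s, k)
def pvADense (g : List (List Int)) (rem s : List Int) (k : Int) : Bool :=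
  match rem with
  | [] => true
  | v :: rest =>
    if pvAInnerDense s ((PySem.List.pyGet? g v).getD []) v k 0 then pvADense g rest s k
    else false

def has_set_size_k (g : List (List Int)) (a : Int) (k : Int) (sparse_or_dense : Bool) : Bool :=
  if a < 0 then false
  else
    let n := g.length
    if a > (n : Int) then false
    else
      (pvCombos (pvRange n) a.toNat).any (fun s =>
        (sparse_or_dense && pvASparse g s s k) || (!sparse_or_dense && pvADense g s s k))

-- ===== PORT B =====
-- gain(v, u): the increase of v's count when u joins the set
-- (sparse: g[v].count(u); dense: 1 if u != v and u not in g[v] else 0)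
def pvGain (g : List (List Int)) (sod : Bool) (v u : Int) : Int :=
  if sod then (PySem.List.count ((PySem.List.pyGet? g v).getD []) u : Int)
  else if u ≠ v ∧ u ∉ (PySem.List.pyGet? g v).getD [] then 1 else 0

-- search(need, start, chosen, cnt): the `for u in range(start, n)` loop is
-- recursion on l, the remaining suffix of range(n); cnt is the list of counts
-- of the chosen vertices, parallel to chosen.
def pvSearch (g : List (List Int)) (sod : Bool) (k : Int) (need : Nat)
    (l chosen cnt : List Int) : Bool :=
  match need, l with
  | 0, _ => true
  | _ + 1, [] => false
  | m + 1, u :: rest =>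
    let newCnt := (chosen.zip cnt).map (fun vc => vc.2 + pvGain g sod vc.1 u)
    let cu := ((chosen ++ [u]).map (fun w => pvGain g sod u w)).sum
    if (newCnt.all (fun c => decide (c ≤ k))) && decide (cu ≤ k) then
      if pvSearch g sod k m rest (chosen ++ [u]) (newCnt ++ [cu]) then true
      else pvSearch g sod k (m + 1) rest chosen cnt
    else pvSearch g sod k (m + 1) rest chosen cnt

def has_set_size_k_alt (g : List (List Int)) (a : Int) (k : Int) (sparse_or_dense : Bool) : Bool :=
  if a < 0 || a > (g.length : Int) then false
  else pvSearch g sparse_or_dense k a.toNat (pvRange g.length) [] []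

-- ===== PRECONDITION & SPEC =====
-- Pre_ restricts to the function's documented natural domain "k -- nonnegative int"
-- (plus the degenerate a ≤ 0 / a > n inputs, where k is never consulted): for k < 0
-- both programs still return, but A's early-exit check (which only fires after an
-- increment) lets zero-count vertices pass `d > k`, an accidental corner outside the
-- documented domain, so those inputs are excluded rather than mimicked.
def Pre_has_set_size_k (g : List (List Int)) (a : Int) (k : Int) (sparse_or_dense : Bool) : Prop :=
  0 ≤ k ∨ a ≤ 0 ∨ a > (g.length : Int)
instance (g : List (List Int)) (a : Int) (k : Int) (sparse_or_dense : Bool) : Decidable (Pre_has_set_size_k g a k sparse_or_dense) := by unfold Pre_has_set_size_k; infer_instance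

def pvWitness_has_set_size_k : List (List Int) × Int × Int × Bool := ([[1], [0]], 1, 0, true)

def Spec_has_set_size_k (g : List (List Int)) (a : Int) (k : Int) (sparse_or_dense : Bool) (out : Bool) : Prop := out = has_set_size_k_alt g a k sparse_or_dense
instance (g : List (List Int)) (a : Int) (k : Int) (sparse_or_dense : Bool) (out : Bool) : Decidable (Spec_has_set_size_k g a k sparse_or_dense out) := by unfold Spec_has_set_size_k; infer_instance

-- ===== CLAIM (what is proved, stated in full; the proofs are below) =====
def Claim_equal_has_set_size_k : Prop := ∀ (g : List (List Int)) (a : Int) (k : Int) (sparse_or_dense : Bool), Dom_has_set_size_k g a k sparse_or_dense → Pre_has_set_size_k g a k sparse_or_dense → Spec_has_set_size_k g a k sparse_or_dense (has_set_size_k g a k sparse_or_dense)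

-- ===== LEMMAS AND PROOFS =====

-- sumGain v s = total count of v with respect to the set s, as B accumulates it
def pvSumGain (g : List (List Int)) (sod : Bool) (v : Int) (s : List Int) : Int :=
  (s.map (pvGain g sod v)).sum

theorem pvGain_nonneg (g : List (List Int)) (sod : Bool) (v u : Int) : 0 ≤ pvGain g sod v u := by
  unfold pvGain
  split_ifs <;> simp [PySem.List.count]

theorem pvSumGain_nonneg (g : List (List Int)) (sod : Bool) (v : Int) (s : List Int) :
    0 ≤ pvSumGain g sod v s := by
  unfold pvSumGain
  induction s with
  | nil => simp
  | cons x xs ih =>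
    simp only [List.map_cons, List.sum_cons]
    have := pvGain_nonneg g sod v x
    omega

theorem pvSumGain_append (g : List (List Int)) (sod : Bool) (v : Int) (s t : List Int) :
    pvSumGain g sod v (s ++ t) = pvSumGain g sod v s + pvSumGain g sod v t := by
  unfold pvSumGain; rw [List.map_append, List.sum_append]

-- if a set's final counts all pass, so do the counts of any initial segment
theorem pvCheck_mono (g : List (List Int)) (sod : Bool) (k : Int) (c t : List Int)
    (h : ((c ++ t).all (fun v => decide (pvSumGain g sod v (c ++ t) ≤ k))) = true) :
    (c.all (fun v => decide (pvSumGain g sod v c ≤ k))) = true := by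
  rw [List.all_eq_true] at h ⊢
  intro v hv
  have h1 := h v (List.mem_append_left _ hv)
  have h2 := pvSumGain_nonneg g sod v t
  have h3 := pvSumGain_append g sod v c t
  simp only [decide_eq_true_eq] at h1 ⊢
  omega

theorem pvAInnerSparse_eq (row s : List Int) (k d : Int) (hd : d ≤ k) :
    pvAInnerSparse row s k d = decide (d + (row.countP (fun x => decide (x ∈ s)) : Int) ≤ k) := by
  induction row generalizing d with
  | nil => simp [pvAInnerSparse, hd]
  | cons x rest ih =>
    rw [pvAInnerSparse, List.countP_cons]
    by_cases hx : x ∈ s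
    · rw [if_pos hx]
      have hpx : decide (x ∈ s) = true := by simp [hx]
      rw [hpx, if_pos rfl]
      by_cases hk : d + 1 > k
      · rw [if_pos hk]
        symm
        rw [decide_eq_false_iff_not]
        push_cast
        omega
      · rw [if_neg hk, ih (d + 1) (by omega)]
        simp only [decide_eq_decide]
        push_cast; omega
    · rw [if_neg hx]
      have hpx : decide (x ∈ s) = false := by simp [hx]
      rw [hpx, if_neg (by simp), ih d hd]
      simp

theorem pvAInnerDense_eq (xs row : List Int) (v k d : Int) (hd : d ≤ k) :
    pvAInnerDense xs row v k d = decide (d + (xs.countP (fun x => decide (x ≠ v) && !decide (x ∈ row)) : Int) ≤ k) := by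
  induction xs generalizing d with
  | nil => simp [pvAInnerDense, hd]
  | cons x rest ih =>
    rw [pvAInnerDense, List.countP_cons]
    by_cases hx : x ≠ v ∧ x ∉ row
    · rw [if_pos hx]
      have hpx : (decide (x ≠ v) && !decide (x ∈ row)) = true := by simp [hx.1, hx.2]
      rw [hpx, if_pos rfl]
      by_cases hk : d + 1 > k
      · rw [if_pos hk]
        symm
        rw [decide_eq_false_iff_not]
        push_cast
        omega
      · rw [if_neg hk, ih (d + 1) (by omega)]
        simp only [decide_eq_decide]
        push_cast; omega
    · rw [if_neg hx]
      have hpx : (decide (x ≠ v) && !decide (x ∈ row)) = false := by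
        by_cases h1 : x = v <;> by_cases h2 : x ∈ row <;> simp [h1, h2] at hx ⊢
      rw [hpx, if_neg (by simp), ih d hd]
      simp

theorem pvASparse_eq (g : List (List Int)) (rem s : List Int) (k : Int) (hk : 0 ≤ k) :
    pvASparse g rem s k = rem.all (fun v =>
      decide ((((PySem.List.pyGet? g v).getD []).countP (fun x => decide (x ∈ s)) : Int) ≤ k)) := by
  induction rem with
  | nil => simp [pvASparse]
  | cons v rest ih =>
    rw [pvASparse, List.all_cons, pvAInnerSparse_eq _ _ _ _ hk, zero_add]
    cases hD : decide ((((PySem.List.pyGet? g v).getD []).countP (fun x => decide (x ∈ s)) : Int) ≤ k) with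
    | true => simp [ih]
    | false => simp

theorem pvADense_eq (g : List (List Int)) (rem s : List Int) (k : Int) (hk : 0 ≤ k) :
    pvADense g rem s k = rem.all (fun v =>
      decide (((s.countP (fun x => decide (x ≠ v) && !decide (x ∈ (PySem.List.pyGet? g v).getD []))) : Int) ≤ k)) := by
  induction rem with
  | nil => simp [pvADense]
  | cons v rest ih =>
    rw [pvADense, List.all_cons, pvAInnerDense_eq _ _ _ _ _ hk, zero_add]
    cases hD : decide (((s.countP (fun x => decide (x ≠ v) && !decide (x ∈ (PySem.List.pyGet? g v).getD []))) : Int) ≤ k) with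
    | true => simp [ih]
    | false => simp

theorem pvCombos_sublist (l : List Int) (a : Nat) (s : List Int) (h : s ∈ pvCombos l a) :
    s.Sublist l := by
  induction l generalizing a s with
  | nil =>
    cases a with
    | zero => simp [pvCombos] at h; simp [h]
    | succ a => simp [pvCombos] at h
  | cons x xs ih =>
    cases a with
    | zero => simp [pvCombos] at h; simp [h]
    | succ a =>
      simp only [pvCombos, List.mem_append, List.mem_map] at h
      rcases h with ⟨t, ht, rfl⟩ | h
      · exact List.Sublist.cons₂ x (ih a t ht)
      · exact List.Sublist.cons x (ih (a + 1) s h)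

theorem pvRange_nodup (n : Nat) : (pvRange n).Nodup :=
  (List.nodup_range).map (fun _ _ h => Int.ofNat.inj h)

-- sum over a nodup list of the 0/1 indicator of equality = membership indicator
theorem pvIndicator_sum (x : Int) (s : List Int) (hs : s.Nodup) :
    (s.map (fun w => if x = w then (1 : Int) else 0)).sum = if x ∈ s then 1 else 0 := by
  induction s with
  | nil => simp
  | cons w s' ih =>
    obtain ⟨hw, hs'⟩ := List.nodup_cons.mp hs
    simp only [List.map_cons, List.sum_cons]
    by_cases hxw : x = w
    · subst hxw
      rw [if_pos rfl, ih hs', if_neg hw, if_pos (by simp)]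
      ring
    · rw [if_neg hxw, ih hs']
      have : (x ∈ w :: s') ↔ x ∈ s' := by simp [hxw]
      rw [if_congr this rfl rfl]
      ring

-- sum of list.count over a nodup set s = count of row entries lying in s
theorem sum_map_add_split (s : List Int) (f h : Int → Int) :
    (s.map (fun w => f w + h w)).sum = (s.map f).sum + (s.map h).sum := by
  induction s with
  | nil => simp
  | cons y ys ih => simp only [List.map_cons, List.sum_cons, ih]; ring

theorem count_sum_eq (row s : List Int) (hs : s.Nodup) :
    (s.map (fun w => (PySem.List.count row w : Int))).sum = (row.countP (fun x => decide (x ∈ s)) : Int) := by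
  induction row with
  | nil => simp [PySem.List.count]
  | cons x row ih =>
    have hcnt : (s.map (fun w => (PySem.List.count (x :: row) w : Int))) =
        s.map (fun w => (PySem.List.count row w : Int) + (if x = w then (1:Int) else 0)) := by
      apply List.map_congr_left; intro w _
      rcases eq_or_ne x w with h | h
      · subst h; simp [PySem.List.count]
      · simp [PySem.List.count, h, fun hh : w = x => h hh.symm]
    rw [hcnt, sum_map_add_split, ih, pvIndicator_sum x s hs, List.countP_cons]
    by_cases hx : x ∈ s <;> simp [hx] <;> push_cast <;> ring

-- B's accumulated count equals A's count predicate argument, on nodup sets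
theorem pvSumGain_eq_sparse (g : List (List Int)) (v : Int) (s : List Int) (hs : s.Nodup) :
    pvSumGain g true v s = ((((PySem.List.pyGet? g v).getD []).countP (fun x => decide (x ∈ s)) : Int)) := by
  have h : s.map (pvGain g true v) =
      s.map (fun w => (PySem.List.count ((PySem.List.pyGet? g v).getD []) w : Int)) := by
    apply List.map_congr_left; intro w _; simp [pvGain]
  unfold pvSumGain
  rw [h]
  exact count_sum_eq _ s hs

theorem pvSumGain_eq_dense (g : List (List Int)) (v : Int) (s : List Int) :
    pvSumGain g false v s = ((s.countP (fun x => decide (x ≠ v) && !decide (x ∈ (PySem.List.pyGet? g v).getD []))) : Int) := by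
  unfold pvSumGain pvGain
  induction s with
  | nil => simp
  | cons w s' ih =>
    simp only [List.map_cons, List.sum_cons, List.countP_cons, ih]
    by_cases h : w ≠ v ∧ w ∉ (PySem.List.pyGet? g v).getD []
    · rw [if_neg (by simp), if_pos h]
      have : (decide (w ≠ v) && !decide (w ∈ (PySem.List.pyGet? g v).getD [])) = true := by
        simp [h.1, h.2]
      rw [this]
      push_cast
      simp only [if_pos trivial, ite_true, if_true]
      omega
    · rw [if_neg (by simp), if_neg h]
      have : (decide (w ≠ v) && !decide (w ∈ (PySem.List.pyGet? g v).getD [])) = false := by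
        by_cases h1 : w = v <;> by_cases h2 : w ∈ (PySem.List.pyGet? g v).getD [] <;>
          simp [h1, h2] at h ⊢
      rw [this]
      simp

-- one step of the incremental update: the new count list is again determined by chosen
theorem pvNewCnt_eq (g : List (List Int)) (sod : Bool) (chosen : List Int) (u : Int) :
    ((chosen.zip (chosen.map (fun v => pvSumGain g sod v chosen))).map
        (fun vc => vc.2 + pvGain g sod vc.1 u)) =
      chosen.map (fun v => pvSumGain g sod v (chosen ++ [u])) := by
  have hz : ∀ (f : Int → Int) (l : List Int), l.zip (l.map f) = l.map (fun v => (v, f v)) := by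
    intro f l
    induction l with
    | nil => rfl
    | cons a l ihl => simp [ihl]
  rw [hz]
  rw [List.map_map]
  apply List.map_congr_left
  intro v _
  simp only [Function.comp]
  rw [pvSumGain_append]
  simp [pvSumGain]

-- the step check equals the full pass check of chosen ++ [u]
theorem pvStepCheck_eq (g : List (List Int)) (sod : Bool) (k : Int) (chosen : List Int) (u : Int) :
    (((chosen.map (fun v => pvSumGain g sod v (chosen ++ [u]))).all (fun c => decide (c ≤ k))) &&
        decide ((((chosen ++ [u]).map (fun w => pvGain g sod u w)).sum) ≤ k)) =
      ((chosen ++ [u]).all (fun v => decide (pvSumGain g sod v (chosen ++ [u]) ≤ k))) := by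
  rw [List.all_append, List.all_map]
  simp only [Function.comp, List.all_cons, List.all_nil, Bool.and_true]
  unfold pvSumGain
  rfl

theorem pvAnyCongr {α : Type} (l : List α) (f h : α → Bool) (he : ∀ x ∈ l, f x = h x) :
    l.any f = l.any h := by
  induction l with
  | nil => rfl
  | cons x xs ih => simp only [List.any_cons, he x (by simp), ih (fun y hy => he y (by simp [hy]))]

theorem pvAllCongr {α : Type} (l : List α) (f h : α → Bool) (he : ∀ x ∈ l, f x = h x) :
    l.all f = l.all h := by
  induction l with
  | nil => rfl
  | cons x xs ih => simp only [List.all_cons, he x (by simp), ih (fun y hy => he y (by simp [hy]))]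

theorem pvIfOr (x y : Bool) : (if x = true then true else y) = (x || y) := by
  cases x <;> simp

-- main correctness of the backtracking search
theorem pvSearch_eq (g : List (List Int)) (sod : Bool) (k : Int) (l : List Int) :
    ∀ (need : Nat) (chosen : List Int),
    pvSearch g sod k need l chosen (chosen.map (fun v => pvSumGain g sod v chosen)) =
      (pvCombos l need).any (fun t => t.isEmpty ||
        (chosen ++ t).all (fun v => decide (pvSumGain g sod v (chosen ++ t) ≤ k))) := by
  induction l with
  | nil =>
    intro need chosen
    cases need with
    | zero => simp [pvSearch, pvCombos]
    | succ m => simp [pvSearch, pvCombos]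
  | cons u rest ih =>
    intro need chosen
    cases need with
    | zero => simp [pvSearch, pvCombos]
    | succ m =>
      rw [pvSearch]
      simp only [pvCombos, List.any_append, List.any_map]
      rw [pvNewCnt_eq]
      have hcheck := pvStepCheck_eq g sod k chosen u
      set ck := ((chosen ++ [u]).all (fun v => decide (pvSumGain g sod v (chosen ++ [u]) ≤ k))) with hck
      rw [hcheck]
      have hrec1 : pvSearch g sod k m rest (chosen ++ [u])
          ((chosen.map (fun v => pvSumGain g sod v (chosen ++ [u]))) ++
            [((chosen ++ [u]).map (fun w => pvGain g sod u w)).sum]) =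
          (pvCombos rest m).any (fun t => t.isEmpty ||
            ((chosen ++ [u]) ++ t).all (fun v => decide (pvSumGain g sod v ((chosen ++ [u]) ++ t) ≤ k))) := by
        have harg : (chosen.map (fun v => pvSumGain g sod v (chosen ++ [u]))) ++
            [((chosen ++ [u]).map (fun w => pvGain g sod u w)).sum] =
            (chosen ++ [u]).map (fun v => pvSumGain g sod v (chosen ++ [u])) := by
          rw [List.map_append]
          simp [pvSumGain]
        rw [harg]
        exact ih m (chosen ++ [u])
      have hrec2 := ih (m + 1) chosen
      -- the first `any` of the RHS, with the map pushed inside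
      have hfirst : ∀ t' ∈ pvCombos rest m,
          ((u :: t').isEmpty ||
            (chosen ++ u :: t').all (fun v => decide (pvSumGain g sod v (chosen ++ u :: t') ≤ k))) =
          (ck && (t'.isEmpty ||
            ((chosen ++ [u]) ++ t').all (fun v => decide (pvSumGain g sod v ((chosen ++ [u]) ++ t') ≤ k)))) := by
        intro t' _
        have hassoc : chosen ++ u :: t' = (chosen ++ [u]) ++ t' := by simp
        rw [hassoc]
        simp only [List.isEmpty_cons, Bool.false_or]
        cases t' with
        | nil =>
          simp only [List.isEmpty_nil, Bool.true_or, Bool.and_true]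
          simp [hck]
        | cons y ys =>
          simp only [List.isEmpty_cons, Bool.false_or]
          cases hall : ((chosen ++ [u]) ++ y :: ys).all
              (fun v => decide (pvSumGain g sod v ((chosen ++ [u]) ++ y :: ys) ≤ k)) with
          | false => simp
          | true =>
            have := pvCheck_mono g sod k (chosen ++ [u]) (y :: ys) hall
            rw [hck]
            simp [this]
      simp only [Function.comp_def]
      rw [pvAnyCongr _ _ _ hfirst]
      have hdistr : (pvCombos rest m).any (fun t' => ck && (t'.isEmpty ||
            ((chosen ++ [u]) ++ t').all (fun v => decide (pvSumGain g sod v ((chosen ++ [u]) ++ t') ≤ k)))) =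
          (ck && (pvCombos rest m).any (fun t' => t'.isEmpty ||
            ((chosen ++ [u]) ++ t').all (fun v => decide (pvSumGain g sod v ((chosen ++ [u]) ++ t') ≤ k)))) := by
        cases ck <;> simp
      rw [hdistr]
      rcases Bool.eq_false_or_eq_true ck with hckv | hckv
      · -- chosen ++ [u] passes the check
        rw [hckv]
        simp only [eq_self_iff_true, if_true, Bool.true_and]
        rw [pvIfOr, hrec1, hrec2]
      · -- chosen ++ [u] fails the check: skip u
        rw [hckv]
        simp only [Bool.false_eq_true, if_false, Bool.false_and, Bool.false_or]
        exact hrec2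

-- ===== VERDICT (by name: the statement is the Claim_ definition above) =====
theorem has_set_size_k_spec : Claim_equal_has_set_size_k := by
  intro g a k b hdom hpre
  unfold Pre_has_set_size_k at hpre
  unfold Spec_has_set_size_k has_set_size_k has_set_size_k_alt
  by_cases h1 : a < 0
  · rw [if_pos h1]; simp [h1]
  · by_cases h2 : a > (g.length : Int)
    · rw [if_neg h1, if_pos h2]; simp [h1, h2]
    · rw [if_neg h1, if_neg h2]
      have hg : (decide (a < 0) || decide (a > (g.length : Int))) = false := by simp [h1, h2]
      simp only [hg, Bool.false_eq_true, if_false]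
      have hs0 := pvSearch_eq g b k (pvRange g.length) a.toNat []
      simp only [List.map_nil] at hs0
      rw [hs0]
      rcases hpre with hk | ha | ha
      · apply pvAnyCongr
        intro s hsmem
        have hsub := pvCombos_sublist _ _ _ hsmem
        have hnd : s.Nodup := hsub.nodup (pvRange_nodup g.length)
        simp only [List.nil_append]
        cases hse : s with
        | nil =>
          cases b <;> simp [pvASparse, pvADense]
        | cons y ys =>
          rw [← hse]
          have hne : s.isEmpty = false := by rw [hse]; simp
          rw [hne, Bool.false_or]
          cases b with
          | true =>
            simp only [Bool.true_and, Bool.not_true, Bool.false_and, Bool.or_false]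
            rw [pvASparse_eq g s s k hk]
            apply pvAllCongr
            intro v _
            simp only [List.nil_append, pvSumGain_eq_sparse g v s hnd]
          | false =>
            simp only [Bool.false_and, Bool.not_false, Bool.true_and, Bool.false_or]
            rw [pvADense_eq g s s k hk]
            apply pvAllCongr
            intro v _
            simp only [List.nil_append, pvSumGain_eq_dense g v s]
      · have ha0 : a = 0 := le_antisymm ha (not_lt.mp h1)
        subst ha0
        cases b <;> simp [pvCombos, pvASparse, pvADense]
      · exact absurd ha h2
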